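-- pv_equiv track=rewrite | github.com/Curry30Messi/SNP-Main | haxi08-plus03.py | sort_bases
-- ===== SOURCE A (Python) =====
-- from collections import Counter
--
-- def sort_bases(sequence):
--     bases = {'A': False, 'T': False, 'G': False, 'C': False}
--     result = []
--
--     for base in sequence:
--         if base in bases and not bases[base]:
--             result.append(base)
--             bases[base] = True
--
--     order = {'A': 0, 'T': 1, 'G': 2, 'C': 3}
--     result_sorted = sorted(result, key=lambda x: order[x])
--     sorted_result_str = ''.join(result_sorted)
--
--     base_counts = Counter(sequence)
--     count_str_list = [f"{base}{base_counts[base]}" if base_counts[base] > 0 else "" for base in 'ATGC']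
--     count_str = ''.join(count_str_list)
--
--     return sorted_result_str, count_str
-- ===== SOURCE B (Python) =====
-- from collections import Counter
--
-- def sort_bases(sequence):
--     counts = Counter(sequence)
--     present = [b for b in 'ATGC' if counts[b] > 0]
--     return ''.join(present), ''.join(f"{b}{counts[b]}" for b in present)
-- ===== Notes on version B (the rewrite author's own statement) =====
-- stated objective: simpler
-- what changed: B drops A's seen-flag dict, first-occurrence result list and the sorted() call: it builds one Counter and filters the fixed four-letter alphabet, deriving both output strings directly from the frequency table.
import Mathlib
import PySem

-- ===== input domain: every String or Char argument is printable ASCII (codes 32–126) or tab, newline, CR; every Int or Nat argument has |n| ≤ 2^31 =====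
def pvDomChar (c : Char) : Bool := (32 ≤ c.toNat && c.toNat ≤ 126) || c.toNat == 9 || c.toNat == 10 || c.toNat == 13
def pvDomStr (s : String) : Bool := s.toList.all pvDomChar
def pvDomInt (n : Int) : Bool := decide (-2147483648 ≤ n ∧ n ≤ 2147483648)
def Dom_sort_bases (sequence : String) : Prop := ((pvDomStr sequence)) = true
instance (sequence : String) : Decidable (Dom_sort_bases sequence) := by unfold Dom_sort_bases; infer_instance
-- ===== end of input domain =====

-- B replaces A's seen-flag dict, intermediate result list and sort by a single Counter
-- filtered through the fixed alphabet 'ATGC' (objective: simpler).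


-- ===== PORT A =====
-- loop body: if base in bases and not bases[base]: result.append(base); bases[base] = True
def pvStepA (p : PySem.Dict Char Bool × List Char) (base : Char) :
    PySem.Dict Char Bool × List Char :=
  if p.1.contains base && !(p.1.getD base false) then (p.1.insert base true, p.2 ++ [base]) else p

def sort_bases (sequence : String) : String × String :=
  let bases : PySem.Dict Char Bool :=
    PySem.Dict.ofList [('A', false), ('T', false), ('G', false), ('C', false)]
  let st := sequence.toList.foldl pvStepA (bases, [])
  let order : PySem.Dict Char Int := PySem.Dict.ofList [('A', 0), ('T', 1), ('G', 2), ('C', 3)]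
  let result_sorted := PySem.List.sorted st.2 (fun x => order.getD x 0) false
  let sorted_result_str := String.ofList result_sorted
  let base_counts := PySem.Dict.counter sequence.toList
  let count_str_list :=
    ['A', 'T', 'G', 'C'].map (fun b =>
      if base_counts.getD b 0 > 0 then b :: PySem.Int.toChars (base_counts.getD b 0) else [])
  let count_str := String.ofList count_str_list.flatten   -- ''.join over List Char pieces
  (sorted_result_str, count_str)

-- ===== PORT B =====
def sort_bases_alt (sequence : String) : String × String :=
  let counts := PySem.Dict.counter sequence.toList
  let present := ['A', 'T', 'G', 'C'].filter (fun b => counts.getD b 0 > 0)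
  (String.ofList present,
   String.ofList (present.flatMap (fun b => b :: PySem.Int.toChars (counts.getD b 0))))

-- ===== PRECONDITION & SPEC =====
def Spec_sort_bases (sequence : String) (out : String × String) : Prop := out = sort_bases_alt sequence
instance (sequence : String) (out : String × String) : Decidable (Spec_sort_bases sequence out) := by unfold Spec_sort_bases; infer_instance

-- ===== CLAIM (what is proved, stated in full; the proofs are below) =====
def Claim_equal_sort_bases : Prop := ∀ (sequence : String), Dom_sort_bases sequence → Spec_sort_bases sequence (sort_bases sequence)

-- ===== LEMMAS AND PROOFS =====

-- invariant of A's loop: the flag dict has exactly the keys A,T,G,C, each flag records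
-- membership in the result accumulator, and the result accumulates the first occurrences
-- of the ATGC characters of cs, i.e. a PySem.Set update.
lemma pvLoopA (cs : List Char) (d : PySem.Dict Char Bool) (r : List Char)
    (hk : ∀ b, d.contains b = (['A','T','G','C'].contains b))
    (hv : ∀ b, d.getD b false = r.contains b) :
    (cs.foldl pvStepA (d, r)).2 =
      PySem.Set.update r (cs.filter (fun c => ['A','T','G','C'].contains c)) := by
  induction cs generalizing d r with
  | nil => simp [PySem.Set.update_nil]
  | cons c cs ih =>
    simp only [List.foldl_cons, List.filter_cons]
    by_cases hc : (['A','T','G','C'].contains c) = true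
    · have hc' : c = 'A' ∨ c = 'T' ∨ c = 'G' ∨ c = 'C' := by simpa using hc
      by_cases hr : r.contains c = true
      · have hmem : c ∈ r := by simpa using hr
        have hstep : pvStepA (d, r) c = (d, r) := by
          simp [pvStepA, hk, hv]; tauto
        have hadd : PySem.Set.add r c = r := by
          simp [PySem.Set.add, PySem.Set.contains, hmem]
        rw [hstep, if_pos hc, PySem.Set.update_cons, hadd]
        exact ih d r hk hv
      · have hmem : c ∉ r := by simpa using hr
        have hstep : pvStepA (d, r) c = (d.insert c true, r ++ [c]) := by
          simp [pvStepA, hk, hv]; tauto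
        have hadd : PySem.Set.add r c = r ++ [c] := by
          simp [PySem.Set.add, PySem.Set.contains, hmem]
        rw [hstep, if_pos hc, PySem.Set.update_cons, hadd]
        refine ih _ _ (fun b => ?_) (fun b => ?_)
        · rw [PySem.Dict.contains_insert, hk]
          by_cases hbc : b = c
          · subst hbc; simp; tauto
          · simp [hbc]
        · rw [PySem.Dict.getD_insert]
          by_cases hbc : b = c
          · subst hbc; simp
          · simp [hbc, hv]
    · have hc' : ¬(c = 'A' ∨ c = 'T' ∨ c = 'G' ∨ c = 'C') := by simpa using hc
      have hstep : pvStepA (d, r) c = (d, r) := by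
        simp [pvStepA, hk]; tauto
      rw [hstep, if_neg hc]
      exact ih d r hk hv

-- A's sorted result is the fixed alphabet filtered by occurrence in cs
lemma pvSortedA (cs : List Char) :
    PySem.List.sorted (PySem.Set.ofList (cs.filter (fun c => ['A','T','G','C'].contains c)))
      (fun x => (PySem.Dict.ofList [('A',(0:Int)),('T',1),('G',2),('C',3)]).getD x 0) false =
      ['A','T','G','C'].filter (fun b => cs.contains b) := by
  apply PySem.List.sorted_eq_of_perm_of_pairwise_lt
  · rw [List.perm_ext_iff_of_nodup (List.Nodup.filter _ (by decide)) (PySem.Set.nodup_ofList _)]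
    intro a
    simp [PySem.Set.mem_ofList, List.mem_filter]
    tauto
  · exact List.Pairwise.filter _ (by decide)

-- flatten of ite-pieces = flatMap over the filter
lemma pvFlattenFilter {α β : Type} (l : List α) (p : α → Prop) [DecidablePred p] (f : α → List β) :
    (l.map (fun b => if p b then f b else [])).flatten = (l.filter (fun b => decide (p b))).flatMap f := by
  induction l with
  | nil => rfl
  | cons x xs ih => by_cases h : p x <;> simp [h, ih]

-- ===== VERDICT (by name: the statement is the Claim_ definition above) =====
theorem sort_bases_spec : Claim_equal_sort_bases := by
  intro s _
  unfold Spec_sort_bases sort_bases sort_bases_alt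
  have hmk : PySem.Dict.ofList [('A', false), ('T', false), ('G', false), ('C', false)]
      = PySem.Dict.mk [('A', false), ('T', false), ('G', false), ('C', false)] := by decide
  have hk : ∀ b, (PySem.Dict.ofList [('A', false), ('T', false), ('G', false), ('C', false)]).contains b
      = (['A','T','G','C'].contains b) := by
    intro b
    rw [hmk]
    simp [PySem.Dict.contains_mk, BEq.comm, Bool.beq_eq_decide_eq]
  have hv : ∀ b, (PySem.Dict.ofList [('A', false), ('T', false), ('G', false), ('C', false)]).getD b false
      = ([] : List Char).contains b := by
    intro b
    rw [hmk]
    simp [PySem.Dict.getD, PySem.Dict.get?_mk_cons]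
    split_ifs <;> rfl
  dsimp only
  rw [pvLoopA s.toList _ [] hk hv, PySem.Set.update_nil_left, pvSortedA]
  have hpq : ∀ b ∈ (['A','T','G','C'] : List Char),
      decide ((PySem.Dict.counter s.toList).getD b 0 > 0) = s.toList.contains b := by
    intro b _
    simp [PySem.Dict.getD_counter, List.count_pos_iff]
  rw [List.filter_congr hpq]
  rw [pvFlattenFilter ['A','T','G','C'] (fun b => (PySem.Dict.counter s.toList).getD b 0 > 0)
    (fun b => b :: PySem.Int.toChars ((PySem.Dict.counter s.toList).getD b 0))]
  rw [List.filter_congr hpq]
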